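-- pv_equiv track=rewrite | github.com/PierreM0/stem | stem.py | left_strip
-- ===== SOURCE A (Python) =====
-- def left_strip(string: str) -> tuple[int, int, str]:
--     col = 0
--     line = 0
--     while (col + line) < len(string) and string[col + line].isspace():
--         if string[col + line] == '\n':
--             line, col = line + 1, 0
--         else:
--             col += 1
--     return col, line, string[col + line:]
-- ===== SOURCE B (Python) =====
-- def left_strip(string: str) -> tuple[int, int, str]:
--     rest = string.lstrip()
--     k = len(string) - len(rest)
--     prefix = string[:k]
--     line = prefix.count('\n')
--     col = k - (prefix.rfind('\n') + 1)
--     return col, line, rest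
-- ===== Notes on version B (the rewrite author's own statement) =====
-- stated objective: simpler
-- what changed: Replaces the character-by-character counter loop by lstrip()/count()/rfind() library calls that compute the whitespace-prefix length, line count and column directly.
-- intended difference: On strings whose leading whitespace contains a newline preceded by some non-newline whitespace, A's index col+line jumps backwards after the newline and re-counts the same characters, returning an inflated line number (e.g. ' \nx' gives (0, 2, 'x')); B returns the true position (0, 1, 'x'), the intended line/column of the first non-space character. — e.g. on left_strip(" \nx"): A returns (0, 2, "x"), B returns (0, 1, "x")
import Mathlib
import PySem

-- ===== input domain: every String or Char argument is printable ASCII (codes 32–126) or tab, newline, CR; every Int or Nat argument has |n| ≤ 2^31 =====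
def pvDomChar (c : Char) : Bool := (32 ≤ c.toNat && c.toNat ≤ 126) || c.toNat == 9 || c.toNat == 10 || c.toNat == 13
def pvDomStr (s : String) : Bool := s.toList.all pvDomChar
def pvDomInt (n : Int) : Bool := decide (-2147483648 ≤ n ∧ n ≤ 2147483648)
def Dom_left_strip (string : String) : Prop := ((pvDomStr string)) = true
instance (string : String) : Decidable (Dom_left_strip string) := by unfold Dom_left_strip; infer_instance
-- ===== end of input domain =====

-- B replaces A's character-by-character counter loop by lstrip/count/rfind library calls (simpler);
-- where a newline in the leading whitespace follows other whitespace, A's scan double-counts lines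
-- and B returns the intended position (see D_left_strip below).

-- ===== PORT A =====
-- Source A's while loop: state (col, line), index col + line, re-scanning exactly as Python does
def laLoop (cs : List Char) (col line : Nat) : Nat × Nat :=
  match h : cs[col + line]? with
  | none => (col, line)
  | some c =>
    if PySem.Chars.isspace c then
      if c = '\n' then laLoop cs 0 (line + 1)
      else laLoop cs (col + 1) line
    else (col, line)
termination_by (cs.length - line, cs.length - col)
decreasing_by
  · have hlt : col + line < cs.length := (List.getElem?_eq_some_iff.mp h).1
    apply Prod.Lex.left; omega
  · have hlt : col + line < cs.length := (List.getElem?_eq_some_iff.mp h).1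
    apply Prod.Lex.right; omega

def left_strip (string : String) : Int × Int × String :=
  let cl := laLoop string.toList 0 0
  ((cl.1 : Int), (cl.2 : Int),
   PySem.Str.slice string (some ((cl.1 : Int) + (cl.2 : Int))) none)

-- ===== PORT B =====
def left_strip_alt (string : String) : Int × Int × String :=
  let rest := PySem.Str.lstrip string
  let k : Int := PySem.Str.len string - PySem.Str.len rest
  let pre := PySem.Str.slice string none (some k)
  let line : Int := (PySem.Str.count pre "\n" : Int)
  let col : Int := k - (PySem.Str.rfind pre "\n" + 1)
  (col, line, rest)

-- ===== PRECONDITION & SPEC =====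
-- On strings whose leading whitespace contains a newline preceded by some non-newline whitespace,
-- A's index col+line jumps backwards after the newline and re-counts the same whitespace, returning
-- an inflated line number; B returns the true line/column of the first non-space character, which is
-- the intended result.
def D_left_strip (string : String) : Prop :=
  '\n' ∈ ((string.toList.takeWhile PySem.Chars.isspace).dropWhile (· == '\n'))
instance (string : String) : Decidable (D_left_strip string) := by unfold D_left_strip; infer_instance

def Spec_left_strip (string : String) (out : Int × Int × String) : Prop :=
  ¬ D_left_strip string → out = left_strip_alt string
instance (string : String) (out : Int × Int × String) : Decidable (Spec_left_strip string out) := by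
  unfold Spec_left_strip; infer_instance

def pvDiffWitness_left_strip : String := " \nx"
def pvDiffWitnessOut_left_strip : (Int × Int × String) × (Int × Int × String) :=
  ((0, 2, "x"), (0, 1, "x"))

-- ===== CLAIM (what is proved, stated in full; the proofs are below) =====
def Claim_unchanged_left_strip : Prop :=
  ∀ (string : String), Dom_left_strip string → Spec_left_strip string (left_strip string)
def Claim_changed_left_strip : Prop :=
  Dom_left_strip (pvDiffWitness_left_strip) ∧ D_left_strip (pvDiffWitness_left_strip) ∧
  left_strip (pvDiffWitness_left_strip) = pvDiffWitnessOut_left_strip.1 ∧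
  left_strip_alt (pvDiffWitness_left_strip) = pvDiffWitnessOut_left_strip.2 ∧
  pvDiffWitnessOut_left_strip.1 ≠ pvDiffWitnessOut_left_strip.2
def Claim_exact_left_strip : Prop :=
  ∀ (string : String), Dom_left_strip string → D_left_strip string →
    left_strip string ≠ left_strip_alt string

-- ===== LEMMAS AND PROOFS =====

theorem isPrefixOf_singleton (c : Char) (s : List Char) :
    ([c].isPrefixOf s = true) ↔ s.head? = some c := by
  cases s with
  | nil => simp [List.isPrefixOf]
  | cons h t => simp [List.isPrefixOf, eq_comm, BEq.beq]

theorem getElem?_repl_append (c : Char) (m : Nat) (t : List Char) (h : c ∉ t) (i : Nat) :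
    (List.replicate m c ++ t)[i]? = some c ↔ i < m := by
  constructor
  · intro hs
    by_contra hge
    push_neg at hge
    rw [List.getElem?_append_right (by simpa using hge)] at hs
    simp at hs
    exact h (by
      have := List.mem_of_getElem? hs
      simpa using this)
  · intro hi
    rw [List.getElem?_append_left (by simpa using hi)]
    simp [hi]

theorem rfind_go_singleton (c : Char) (m : Nat) (t : List Char) (h : c ∉ t) :
    ∀ j, m ≤ j + 1 →
      PySem.Chars.rfind.go (List.replicate m c ++ t) [c] j = (m : Int) - 1 := by
  intro j
  induction j with
  | zero =>
    intro hm
    rw [PySem.Chars.rfind.go.eq_def]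
    simp only []
    by_cases h0 : m = 0
    · subst h0
      rw [if_neg]
      · norm_num
      · simp only [isPrefixOf_singleton, List.replicate, List.nil_append]
        intro hh
        exact h (List.mem_of_mem_head? (by simp [hh]))
    · have h1 : m = 1 := by omega
      subst h1
      rw [if_pos]
      · norm_num
      · rw [isPrefixOf_singleton]
        simp [List.replicate]
  | succ j ih =>
    intro hm
    rw [PySem.Chars.rfind.go.eq_def]
    simp only []
    by_cases hj : m = j + 2
    · rw [if_pos]
      · subst hj; push_cast; ring
      · rw [isPrefixOf_singleton, List.head?_drop]
        rw [getElem?_repl_append c m t h]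
        omega
    · rw [if_neg, ih (by omega)]
      rw [isPrefixOf_singleton, List.head?_drop]
      rw [getElem?_repl_append c m t h]
      omega

theorem rfind_singleton (c : Char) (m : Nat) (t : List Char) (h : c ∉ t) :
    PySem.Chars.rfind (List.replicate m c ++ t) [c] = (m : Int) - 1 := by
  rw [PySem.Chars.rfind]
  apply rfind_go_singleton c m t h
  simp; omega

theorem count_go_singleton (c : Char) :
    ∀ (l : List Char) (fuel acc : Nat), l.length ≤ fuel →
      PySem.Chars.count.go [c] fuel l acc = acc + l.count c := by
  intro l
  induction l with
  | nil =>
    intro fuel acc _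
    rw [PySem.Chars.count.go.eq_def]
    cases fuel <;> simp
  | cons hd tl ih =>
    intro fuel acc hf
    cases fuel with
    | zero => simp at hf
    | succ f =>
      rw [PySem.Chars.count.go.eq_def]
      simp only []
      by_cases hc : hd = c
      · subst hc
        rw [if_pos (by rw [isPrefixOf_singleton]; simp)]
        simp only [List.length_cons, List.drop_succ_cons, List.length_nil, List.drop_zero]
        rw [ih f (acc + 1) (by simpa using hf)]
        simp [List.count_cons]
        omega
      · rw [if_neg (by rw [isPrefixOf_singleton]; simp [hc])]
        rw [ih f acc (by simpa using hf)]
        simp [List.count_cons, hc]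

theorem count_singleton (c : Char) (l : List Char) :
    PySem.Chars.count l [c] = l.count c := by
  rw [PySem.Chars.count]
  rw [if_neg (by simp)]
  simpa using count_go_singleton c l l.length 0 le_rfl

theorem laLoop_space (cs : List Char) (m k : Nat)
    (h2 : ∀ i, m ≤ i → i < k → ∃ c, cs[i]? = some c ∧ PySem.Chars.isspace c = true ∧ c ≠ '\n')
    (h3 : ∀ c, cs[k]? = some c → PySem.Chars.isspace c = false) :
    ∀ col, m + col ≤ k → laLoop cs col m = (k - m, m) := by
  intro col hck
  induction hd : k - (m + col) generalizing col with
  | zero =>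
    have : m + col = k := by omega
    have : col + m = k := by omega
    rw [laLoop.eq_def]
    rw [this]
    split
    · have : col = k - m := by omega
      simp [this]
    · rename_i c hc
      rw [h3 c hc]
      simp
      omega
  | succ n ih =>
    have hlt : m + col < k := by omega
    obtain ⟨c, hc, hsp, hnl⟩ := h2 (col + m) (by omega) (by omega)
    rw [laLoop.eq_def, hc]
    simp only [hsp, if_true, if_neg hnl]
    rw [ih (col + 1) (by omega) (by omega)]

theorem laLoop_nl (cs : List Char) (m : Nat)
    (h1 : ∀ i, i < m → cs[i]? = some '\n') :
    ∀ j, j ≤ m → laLoop cs 0 j = laLoop cs 0 m := by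
  intro j hj
  induction hd : m - j generalizing j with
  | zero =>
    have : j = m := by omega
    rw [this]
  | succ n ih =>
    have hlt : j < m := by omega
    have hc := h1 j hlt
    have hc' : cs[0 + j]? = some '\n' := by simpa using hc
    rw [laLoop.eq_def, hc']
    norm_num [PySem.Chars.isspace]
    exact ih (j + 1) (by omega) (by omega)

theorem laLoop_to_nl (cs : List Char) (j0 line : Nat)
    (hnlj : cs[j0]? = some '\n')
    (hsp : ∀ i, line ≤ i → i < j0 → ∃ c, cs[i]? = some c ∧ PySem.Chars.isspace c = true ∧ c ≠ '\n') :
    ∀ col, line + col ≤ j0 → laLoop cs col line = laLoop cs 0 (line + 1) := by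
  intro col hle
  induction hd : j0 - (line + col) generalizing col with
  | zero =>
    have he : col + line = j0 := by omega
    rw [laLoop.eq_def, he, hnlj]
    simp only [show PySem.Chars.isspace '\n' = true from by decide, if_true, if_pos rfl]
  | succ n ih =>
    obtain ⟨c, hc, hcs, hcn⟩ := hsp (col + line) (by omega) (by omega)
    rw [laLoop.eq_def, hc]
    simp only [hcs, if_true, if_neg hcn]
    exact ih (col + 1) (by omega) (by omega)

theorem laLoop_events (cs : List Char) (k nl : Nat)
    (hnl : cs[nl]? = some '\n') (hnlk : nl < k)
    (hafter : ∀ i, nl < i → i < k → ∃ c, cs[i]? = some c ∧ PySem.Chars.isspace c = true ∧ c ≠ '\n')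
    (hsp_all : ∀ i, i < k → ∃ c, cs[i]? = some c ∧ PySem.Chars.isspace c = true)
    (hend : ∀ c, cs[k]? = some c → PySem.Chars.isspace c = false) :
    ∀ l, l ≤ nl + 1 → laLoop cs 0 l = (k - (nl + 1), nl + 1) := by
  intro l hl
  induction hd : (nl + 1) - l generalizing l with
  | zero =>
    have : l = nl + 1 := by omega
    subst this
    exact laLoop_space cs (nl + 1) k (fun i h1 h2 => hafter i (by omega) h2) hend 0 (by omega)
  | succ n ih =>
    have hlnl : l ≤ nl := by omega
    have hP : ∃ j, l ≤ j ∧ cs[j]? = some '\n' := ⟨nl, hlnl, hnl⟩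
    have hj0 := Nat.find_spec hP
    have hj0le : Nat.find hP ≤ nl := Nat.find_min' hP ⟨hlnl, hnl⟩
    have hstep := laLoop_to_nl cs (Nat.find hP) l hj0.2 (fun i hi1 hi2 => by
      obtain ⟨c, hc, hcs⟩ := hsp_all i (by omega)
      refine ⟨c, hc, hcs, fun hcn => ?_⟩
      exact Nat.find_min hP hi2 ⟨hi1, by rw [hc, hcn]⟩) 0 (by omega)
    rw [hstep]
    exact ih (l + 1) (by omega) (by omega)

theorem left_strip_tight_main (string : String) (hD : D_left_strip string) :
    left_strip string ≠ left_strip_alt string := by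
  intro heq
  unfold D_left_strip at hD
  set p := string.toList.takeWhile PySem.Chars.isspace with hp
  set r := string.toList.dropWhile PySem.Chars.isspace with hr
  set k := p.length with hk
  have hcs : string.toList = p ++ r := (List.takeWhile_append_dropWhile).symm
  have hmemp : '\n' ∈ p := (List.dropWhile_sublist _).mem hD
  set q := p.reverse.takeWhile (fun c => !(c == '\n')) with hq
  set w := p.reverse.dropWhile (fun c => !(c == '\n')) with hw
  have hrev : p.reverse = q ++ w := (List.takeWhile_append_dropWhile).symm
  have hq_nonl : '\n' ∉ q := fun hm => by have := List.mem_takeWhile_imp hm; simp at this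
  have hwne : w ≠ [] := by
    intro h0
    have h1 : p.reverse = q := by rw [hrev, h0, List.append_nil]
    have hm : '\n' ∈ q := h1 ▸ (List.mem_reverse.mpr hmemp)
    exact hq_nonl hm
  obtain ⟨w0, w', hw0⟩ := List.exists_cons_of_ne_nil hwne
  have hw0nl : w0 = '\n' := by
    have hf := List.find?_not_eq_head?_dropWhile (p := fun c => !(c == '\n')) (l := p.reverse)
    rw [← hw, hw0] at hf
    have := List.find?_some (by simpa using hf)
    simpa using this
  set u := w'.reverse with hu
  set v := q.reverse with hv
  have hdecomp : p = u ++ '\n' :: v := by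
    have h1 := congrArg List.reverse hrev
    rw [List.reverse_reverse, hw0, hw0nl] at h1
    rw [h1]
    simp [hu, hv, List.reverse_append]
  have hv_nonl : '\n' ∉ v := fun hm => hq_nonl (by
    rw [hv, List.mem_reverse] at hm; exact hm)
  have hkuv : k = u.length + 1 + v.length := by
    rw [hk, hdecomp]; simp; omega
  have hsp_all : ∀ i, i < k → ∃ c, string.toList[i]? = some c ∧ PySem.Chars.isspace c = true := by
    intro i hik
    have hip : i < p.length := hik
    refine ⟨p[i]'hip, ?_, ?_⟩
    · rw [hcs, List.getElem?_append_left (by omega)]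
      exact List.getElem?_eq_getElem hip
    · exact List.mem_takeWhile_imp (List.getElem_mem hip)
  have hnlpos : string.toList[u.length]? = some '\n' := by
    rw [hcs, List.getElem?_append_left (by omega), hdecomp,
        List.getElem?_append_right (le_refl u.length)]
    simp
  have hafter : ∀ i, u.length < i → i < k →
      ∃ c, string.toList[i]? = some c ∧ PySem.Chars.isspace c = true ∧ c ≠ '\n' := by
    intro i hui hik
    obtain ⟨c, hc, hcsp⟩ := hsp_all i hik
    refine ⟨c, hc, hcsp, fun hcn => ?_⟩
    subst hcn
    have hpc : p[i]? = some '\n' := by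
      rw [hcs, List.getElem?_append_left (by omega)] at hc
      exact hc
    rw [hdecomp, List.getElem?_append_right (by omega)] at hpc
    have h1 : i - u.length = (i - u.length - 1) + 1 := by omega
    rw [h1, List.getElem?_cons_succ] at hpc
    exact hv_nonl (List.mem_of_getElem? hpc)
  have hend : ∀ c, string.toList[k]? = some c → PySem.Chars.isspace c = false := by
    intro c hc
    rw [hcs, List.getElem?_append_right (by omega)] at hc
    have h0 : k - p.length = 0 := by omega
    rw [h0] at hc
    have hhd : r.head? = some c := by rw [List.head?_eq_getElem?]; exact hc
    have hf := List.find?_not_eq_head?_dropWhile (p := PySem.Chars.isspace) (l := string.toList)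
    rw [← hr, hhd] at hf
    have := List.find?_some hf
    simpa using this
  have hA := laLoop_events string.toList k u.length hnlpos (by omega) hafter hsp_all hend 0 (by omega)
  -- B-side pieces
  have hrest : PySem.Str.lstrip string = String.ofList r := by
    rw [PySem.Str.lstrip]; rfl
  have hlen : PySem.Str.len string - PySem.Str.len (String.ofList r) = (k : Int) := by
    rw [PySem.Str.len, PySem.Str.len, String.toList_ofList]
    rw [hcs, List.length_append]
    push_cast
    ring
  have hpre : PySem.Str.slice string none (some (k : Int)) = String.ofList p := by
    rw [PySem.Str.slice]
    congr 1
    rw [PySem.Chars.slice, PySem.List.slice_to _ (by positivity)]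
    rw [Int.toNat_natCast, hcs, hk, List.take_left]
  have hcnt : PySem.Str.count (String.ofList p) "\n" = p.count '\n' := by
    rw [PySem.Str.count, String.toList_ofList, show ("\n" : String).toList = ['\n'] from rfl]
    exact count_singleton '\n' p
  have hcountp : p.count '\n' = u.count '\n' + 1 := by
    rw [hdecomp, List.count_append]
    simp [List.count_cons, List.count_eq_zero.mpr hv_nonl]
  have hcu_lt : u.count '\n' < u.length := by
    have hle : u.count '\n' ≤ u.length := List.count_le_length
    rcases lt_or_eq_of_le hle with h | h
    · exact h
    · exfalso
      rw [List.count_eq_length] at h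
      rw [hdecomp, List.dropWhile_append] at hD
      have hdu : List.dropWhile (· == '\n') u = [] := by
        rw [List.dropWhile_eq_nil_iff]
        intro x hx
        simp [← h x hx]
      rw [hdu] at hD
      simp only [List.isEmpty_nil, if_true] at hD
      rw [List.dropWhile_cons_of_pos (by simp)] at hD
      exact hv_nonl ((List.dropWhile_sublist _).mem hD)
  -- compare second components
  have h2 := congrArg (fun z : Int × Int × String => z.2.1) heq
  simp only [left_strip, left_strip_alt, hA, hrest, hlen, hpre, hcnt] at h2
  rw [hcountp] at h2
  omega

theorem left_strip_main (string : String) (hnD : ¬ D_left_strip string) :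
    left_strip string = left_strip_alt string := by
  have cs := string.toList
  set p := string.toList.takeWhile PySem.Chars.isspace with hp
  set t := p.dropWhile (· == '\n') with hT
  set m := (p.takeWhile (· == '\n')).length with hm
  set r := string.toList.dropWhile PySem.Chars.isspace with hr
  set k := p.length with hk
  have hnt : '\n' ∉ t := hnD
  have hpt : p = List.replicate m '\n' ++ t := by
    conv_lhs => rw [← List.takeWhile_append_dropWhile (p := fun x => x == '\n') (l := p)]
    rw [← hT]
    congr 1
    rw [List.eq_replicate_iff]
    refine ⟨rfl, fun b hb => ?_⟩
    have := List.mem_takeWhile_imp hb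
    simpa using this
  have hcs : string.toList = p ++ r := (List.takeWhile_append_dropWhile).symm
  have hmk : m + t.length = k := by
    rw [hk, hpt]; simp
  have ht_mem : ∀ x ∈ t, PySem.Chars.isspace x = true ∧ x ≠ '\n' := by
    intro x hx
    constructor
    · exact List.mem_takeWhile_imp ((List.dropWhile_sublist _).mem hx)
    · intro hxe; exact hnt (hxe ▸ hx)
  -- index facts
  have f1 : ∀ i, i < m → string.toList[i]? = some '\n' := by
    intro i hi
    rw [hcs, List.getElem?_append_left (by rw [hpt]; simp; omega)]
    rw [hpt, List.getElem?_append_left (by simpa using hi), List.getElem?_replicate, if_pos hi]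
  have f2 : ∀ i, m ≤ i → i < k → ∃ c, string.toList[i]? = some c ∧ PySem.Chars.isspace c = true ∧ c ≠ '\n' := by
    intro i him hik
    have hit : i - m < t.length := by omega
    have hc : t[i - m]? = some (t[i - m]'hit) := List.getElem?_eq_getElem hit
    refine ⟨_, ?_, ht_mem _ (List.getElem_mem hit)⟩
    rw [hcs, List.getElem?_append_left (by omega), hpt,
        List.getElem?_append_right (by simpa using him)]
    simpa using hc
  have f3 : ∀ c, string.toList[k]? = some c → PySem.Chars.isspace c = false := by
    intro c hc
    rw [hcs, List.getElem?_append_right (by omega)] at hc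
    have h0 : k - p.length = 0 := by omega
    rw [h0] at hc
    have hhd : r.head? = some c := by rw [List.head?_eq_getElem?]; exact hc
    have hf := List.find?_not_eq_head?_dropWhile (p := PySem.Chars.isspace) (l := string.toList)
    rw [← hr, hhd] at hf
    have := List.find?_some hf
    simpa using this
  -- A's loop value
  have hA : laLoop string.toList 0 0 = (t.length, m) := by
    have hmlek : m ≤ k := by omega
    rw [laLoop_nl string.toList m f1 0 (Nat.zero_le m)]
    have := laLoop_space string.toList m k f2 f3 0 (by omega)
    rw [this]
    congr 1
    omega
  -- B's components
  have hrest : PySem.Str.lstrip string = String.ofList r := by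
    rw [PySem.Str.lstrip]; rfl
  have hlen : PySem.Str.len string - PySem.Str.len (String.ofList r) = (k : Int) := by
    rw [PySem.Str.len, PySem.Str.len, String.toList_ofList]
    rw [hcs, List.length_append]
    push_cast
    ring
  have hpre : PySem.Str.slice string none (some (k : Int)) = String.ofList p := by
    rw [PySem.Str.slice]
    congr 1
    rw [PySem.Chars.slice, PySem.List.slice_to _ (by positivity)]
    rw [Int.toNat_natCast, hcs, hk, List.take_left]
  have hcount : PySem.Chars.count p ['\n'] = m := by
    rw [count_singleton, hpt, List.count_append, List.count_replicate]
    simp [List.count_eq_zero.mpr hnt]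
  have hrfind : PySem.Chars.rfind p ['\n'] = (m : Int) - 1 := by
    rw [hpt]; exact rfind_singleton '\n' m t hnt
  have hAslice : PySem.Str.slice string (some ((t.length : Int) + (m : Int))) none = String.ofList r := by
    rw [PySem.Str.slice]
    congr 1
    rw [PySem.Chars.slice, PySem.List.slice_from _ (by positivity)]
    have : ((t.length : Int) + (m : Int)).toNat = k := by omega
    rw [this, hcs, hk, List.drop_left]
  -- assemble
  simp only [left_strip, left_strip_alt, hA, hrest]
  rw [hlen, hpre, PySem.Str.count, PySem.Str.rfind, String.toList_ofList]
  have hnl : ("\n" : String).toList = ['\n'] := rfl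
  rw [hnl, hcount, hrfind]
  refine Prod.ext ?_ (Prod.ext ?_ ?_)
  · show ((t.length : Nat) : Int) = (k : Int) - ((m : Int) - 1 + 1)
    omega
  · show ((m : Nat) : Int) = (m : Int)
    rfl
  · exact hAslice

-- ===== VERDICT (by name: the statement is the Claim_ definition above) =====
theorem left_strip_spec : Claim_unchanged_left_strip := by
  intro string _ hnD
  exact left_strip_main string hnD

theorem left_strip_changed : Claim_changed_left_strip := by
  unfold Claim_changed_left_strip
  refine ⟨by decide, by decide, ?_, by decide, by decide⟩
  show left_strip " \nx" = (0, 2, "x")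
  have e0 : laLoop [' ','\n','x'] 0 0 = laLoop [' ','\n','x'] 1 0 := by
    rw [laLoop.eq_def, show (([' ','\n','x'] : List Char)[0+0]?) = some ' ' from rfl]
    simp only [show PySem.Chars.isspace ' ' = true from by decide, if_true]
    rw [if_neg (by decide)]
  have e1 : laLoop [' ','\n','x'] 1 0 = laLoop [' ','\n','x'] 0 1 := by
    rw [laLoop.eq_def, show (([' ','\n','x'] : List Char)[1+0]?) = some '\n' from rfl]
    simp only [show PySem.Chars.isspace '\n' = true from by decide, if_true]
  have e2 : laLoop [' ','\n','x'] 0 1 = laLoop [' ','\n','x'] 0 2 := by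
    rw [laLoop.eq_def, show (([' ','\n','x'] : List Char)[0+1]?) = some '\n' from rfl]
    simp only [show PySem.Chars.isspace '\n' = true from by decide, if_true]
  have e3 : laLoop [' ','\n','x'] 0 2 = (0, 2) := by
    rw [laLoop.eq_def, show (([' ','\n','x'] : List Char)[0+2]?) = some 'x' from rfl]
    simp only [show PySem.Chars.isspace 'x' = false from by decide, Bool.false_eq_true, if_false]
  have hl : laLoop (" \nx").toList 0 0 = (0, 2) := by
    rw [show (" \nx").toList = [' ','\n','x'] from rfl, e0, e1, e2, e3]
  simp only [left_strip, hl]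
  decide

theorem left_strip_tight : Claim_exact_left_strip := by
  intro string _ hD
  exact left_strip_tight_main string hD
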